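-- pv_equiv track=rewrite | github.com/kshivam26/depfast-ae | analyze_wait.py | categorize_into_buckets
-- ===== SOURCE A (Python) =====
-- def categorize_into_buckets(differences):
--     buckets = {}
--
--     for i in range(0, 61, 2):
--         label = f"{i}-{i+2}"
--         buckets[label] = 0
--
--     for diff in differences:
--         for i in range(0, 61, 2):
--             if i <= diff < i + 2:
--                 label = f"{i}-{i+2}"
--                 buckets[label] += 1
--                 break
--
--     return buckets
-- ===== SOURCE B (Python) =====
-- def categorize_into_buckets(differences):
--     buckets = {}
--
--     for i in range(0, 61, 2):
--         label = f"{i}-{i+2}"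
--         buckets[label] = 0
--
--     for diff in differences:
--         if 0 <= diff < 62:
--             i = int(diff // 2) * 2
--             buckets[f"{i}-{i+2}"] += 1
--
--     return buckets
-- ===== Notes on version B (the rewrite author's own statement) =====
-- stated objective: faster
-- what changed: The inner linear scan over the 31 bucket ranges is replaced by a range guard plus a direct bucket-index computation i = int(diff // 2) * 2, so each element is bucketed in O(1) instead of scanning up to 31 ranges.
import Mathlib
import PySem

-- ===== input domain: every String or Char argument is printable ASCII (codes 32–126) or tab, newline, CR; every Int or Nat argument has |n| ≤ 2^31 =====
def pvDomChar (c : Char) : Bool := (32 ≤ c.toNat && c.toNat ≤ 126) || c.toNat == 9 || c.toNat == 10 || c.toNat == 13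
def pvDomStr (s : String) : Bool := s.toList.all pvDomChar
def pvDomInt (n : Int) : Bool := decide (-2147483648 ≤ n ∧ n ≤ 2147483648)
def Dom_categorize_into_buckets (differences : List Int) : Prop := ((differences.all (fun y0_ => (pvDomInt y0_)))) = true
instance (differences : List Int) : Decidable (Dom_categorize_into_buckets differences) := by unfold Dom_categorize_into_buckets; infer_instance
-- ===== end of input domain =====

-- B replaces A's inner linear scan over the 31 bucket ranges by a range guard plus a
-- direct bucket-index computation i = (diff // 2) * 2 (simpler, O(1) per element).


-- ===== PORT A =====
-- f"{i}-{i+2}" (shared by both Pythons verbatim)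
def pvLabel (i : Int) : String := PySem.Int.toStr i ++ "-" ++ PySem.Int.toStr (i + 2)

-- the initialisation loop (identical in A and B): buckets[label] = 0 for i in range(0, 61, 2)
def pvInit : PySem.Dict String Int :=
  (PySem.List.pyRange 0 61 2).foldl (fun d i => d.insert (pvLabel i) 0) PySem.Dict.empty

-- inner 'for i in range(0, 61, 2): if i <= diff < i+2: buckets[label] += 1; break'
def pvScan (diff : Int) : List Int → PySem.Dict String Int → PySem.Dict String Int
  | [], d => d
  | i :: rest, d =>
      if i ≤ diff ∧ diff < i + 2 then d.modify (pvLabel i) 0 (· + 1)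
      else pvScan diff rest d

def categorize_into_buckets (differences : List Int) : List (String × Int) :=
  (differences.foldl (fun d diff => pvScan diff (PySem.List.pyRange 0 61 2) d) pvInit).items

-- ===== PORT B =====
-- 'if 0 <= diff < 62: i = int(diff // 2) * 2; buckets[f"{i}-{i+2}"] += 1'
def pvStepB (d : PySem.Dict String Int) (diff : Int) : PySem.Dict String Int :=
  if 0 ≤ diff ∧ diff < 62 then
    d.modify (pvLabel (PySem.Int.floordiv diff 2 * 2)) 0 (· + 1)
  else d

def categorize_into_buckets_alt (differences : List Int) : List (String × Int) :=
  (differences.foldl pvStepB pvInit).items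

-- ===== PRECONDITION & SPEC =====
def Spec_categorize_into_buckets (differences : List Int) (out : List (String × Int)) : Prop := out = categorize_into_buckets_alt differences
instance (differences : List Int) (out : List (String × Int)) : Decidable (Spec_categorize_into_buckets differences out) := by unfold Spec_categorize_into_buckets; infer_instance

-- ===== CLAIM (what is proved, stated in full; the proofs are below) =====
def Claim_equal_categorize_into_buckets : Prop := ∀ (differences : List Int), Dom_categorize_into_buckets differences → Spec_categorize_into_buckets differences (categorize_into_buckets differences)

-- ===== LEMMAS AND PROOFS =====

theorem pvRange_lit : PySem.List.pyRange 0 61 2 =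
    [0, 2, 4, 6, 8, 10, 12, 14, 16, 18, 20, 22, 24, 26, 28, 30, 32, 34, 36, 38,
     40, 42, 44, 46, 48, 50, 52, 54, 56, 58, 60] := by decide

theorem pvScan_none (diff : Int) (l : List Int) (d : PySem.Dict String Int)
    (h : ∀ i ∈ l, ¬(i ≤ diff ∧ diff < i + 2)) : pvScan diff l d = d := by
  induction l with
  | nil => rfl
  | cons i rest ih =>
      simp only [pvScan, if_neg (h i (List.mem_cons_self ..))]
      exact ih (fun j hj => h j (List.mem_cons_of_mem _ hj))

theorem pvStep_eq (diff : Int) (d : PySem.Dict String Int) :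
    pvScan diff (PySem.List.pyRange 0 61 2) d = pvStepB d diff := by
  rw [pvRange_lit]
  by_cases h : 0 ≤ diff ∧ diff < 62
  · obtain ⟨h0, h1⟩ := h
    unfold pvStepB
    rw [if_pos ⟨h0, h1⟩]
    interval_cases diff <;>
      simp [pvScan, PySem.Int.floordiv]
  · rw [pvScan_none diff _ d (by intro i hi; simp only [List.mem_cons, List.not_mem_nil, or_false] at hi; omega)]
    simp [pvStepB, h]

theorem pvFoldl_eq (l : List Int) (d : PySem.Dict String Int) :
    l.foldl (fun d diff => pvScan diff (PySem.List.pyRange 0 61 2) d) d = l.foldl pvStepB d := by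
  have h : (fun d diff => pvScan diff (PySem.List.pyRange 0 61 2) d) = pvStepB := by
    funext d diff; exact pvStep_eq diff d
  rw [h]

-- ===== VERDICT (by name: the statement is the Claim_ definition above) =====
theorem categorize_into_buckets_spec : Claim_equal_categorize_into_buckets := by
  intro differences _
  unfold Spec_categorize_into_buckets categorize_into_buckets categorize_into_buckets_alt
  rw [pvFoldl_eq]
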